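-- pv_equiv track=rewrite | github.com/cry999/AtCoder | beginner/017/D.py | supplement
-- ===== SOURCE A (Python) =====
-- def supplement(N: int, M: int, F: list) -> int:
--     MOD = 10**9 + 7
--
--     # dp[i] は i 個目までのサプリメントの摂取方法
--     dp = [0] * (N+1)
--     dp[0] = 1
--
--     # 現在見ている区間で味 fi を既に使用している場合には
--     # fi in using == True
--     using = [False] * (M+1)
--     l, r = 0, 0  # 現在見ている区間の左右のインデックス
--     s = dp[0]    # 現在見ている区間の累積和
--
--     for r in range(N):
--         # 新しく入る右端をチェック
--         while using[F[r]]: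
--             # 現在の区間ですでに使っているなら、使わなくなるまで
--             # 左端をすすめる。
--             using[F[l]] = False
--             s -= dp[l]
--             s %= MOD
--             l += 1
--         dp[r+1] = s
--
--         # 右端を進める
--         s += dp[r+1]
--         s %= MOD
--         using[F[r]] = True
--         r += 1
--
--     return dp[N]
-- ===== SOURCE B (Python) =====
-- def supplement(N: int, M: int, F: list) -> int:
--     MOD = 10**9 + 7
--     # P[i] = (dp[0] + ... + dp[i-1]) % MOD ; dp[0] = 1
--     P = [0, 1]
--     last = {}   # flavor -> most recent index
--     left = 0    # left end of the current all-distinct window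
--     for r in range(N):
--         f = F[r]
--         if f in last and last[f] + 1 > left:
--             left = last[f] + 1
--         dpr = (P[-1] - P[left]) % MOD
--         P.append((P[-1] + dpr) % MOD)
--         last[f] = r
--     return (P[-1] - P[-2]) % MOD
-- ===== Notes on version B (the rewrite author's own statement) =====
-- stated objective: alternative
-- what changed: Replaced the incremental sliding-window state (boolean used-flavor table, running window sum, inner while-loop shrinking the left end) by a prefix-sum list plus a last-occurrence dictionary: each dp value is a prefix-sum difference and the window's left end jumps directly to last[f]+1, with no inner loop and no per-flavor table.
-- outside the precondition, e.g. on supplement(2, 0, [0, -1]): A returns 1, B returns 2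
import Mathlib
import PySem

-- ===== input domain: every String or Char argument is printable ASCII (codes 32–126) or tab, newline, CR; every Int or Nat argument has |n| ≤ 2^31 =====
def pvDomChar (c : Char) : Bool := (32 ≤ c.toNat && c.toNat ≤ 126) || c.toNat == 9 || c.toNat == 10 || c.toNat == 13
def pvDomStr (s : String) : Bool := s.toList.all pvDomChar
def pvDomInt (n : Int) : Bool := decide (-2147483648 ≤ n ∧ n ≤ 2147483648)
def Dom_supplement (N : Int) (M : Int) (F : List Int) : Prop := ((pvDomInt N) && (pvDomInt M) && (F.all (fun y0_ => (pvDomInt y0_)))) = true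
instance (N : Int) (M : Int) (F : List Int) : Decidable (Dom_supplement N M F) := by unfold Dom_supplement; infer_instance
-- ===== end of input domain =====

-- B replaces A's incremental sliding window (used-flavor table + inner while-loop + running sum)
-- by prefix sums and a last-occurrence dictionary; alternative decomposition, same O(N) cost.


-- ===== PORT A =====
-- the inner 'while using[F[r]]' loop; fuel only bounds the recursion (inside Pre_ it never runs out)
def supWhile (F dp : List Int) (fr : Int) : Nat → List Bool → Int → Int → (List Bool × Int × Int)
  | 0, us, l, s => (us, l, s)
  | fuel+1, us, l, s =>
    if PySem.List.pyGetD us fr false then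
      supWhile F dp fr fuel (PySem.List.pySetD us (PySem.List.pyGetD F l 0) false)
        (l + 1) (PySem.Int.mod (s - PySem.List.pyGetD dp l 0) 1000000007)
    else (us, l, s)

-- one iteration of A's 'for r in range(N)' loop over the state (dp, using, l, s)
def supStep (F : List Int) (st : List Int × List Bool × Int × Int) (r : Int) :
    List Int × List Bool × Int × Int :=
  let w := supWhile F st.1 (PySem.List.pyGetD F r 0) F.length st.2.1 st.2.2.1 st.2.2.2
  let dp' := PySem.List.pySetD st.1 (r + 1) w.2.2
  let s' := PySem.Int.mod (w.2.2 + PySem.List.pyGetD dp' (r + 1) 0) 1000000007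
  let us' := PySem.List.pySetD w.1 (PySem.List.pyGetD F r 0) true
  (dp', us', w.2.1, s')

def supplement (N : Int) (M : Int) (F : List Int) : Int :=
  let dp0 := PySem.List.pySetD (List.replicate (N + 1).toNat 0) 0 1
  let us0 := List.replicate (M + 1).toNat false
  let s0 := PySem.List.pyGetD dp0 0 0
  let st := (PySem.List.pyRange 0 N 1).foldl (supStep F) (dp0, us0, 0, s0)
  PySem.List.pyGetD st.1 N 0

-- ===== PORT B =====
-- one iteration of B's loop over the state (P, last, left)
def supAltStep (F : List Int) (st : List Int × PySem.Dict Int Int × Int) (r : Int) :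
    List Int × PySem.Dict Int Int × Int :=
  let f := PySem.List.pyGetD F r 0
  let left := if st.2.1.contains f && decide (st.2.1.getD f 0 + 1 > st.2.2) then st.2.1.getD f 0 + 1 else st.2.2
  let dpr := PySem.Int.mod (PySem.List.pyGetD st.1 (-1) 0 - PySem.List.pyGetD st.1 left 0) 1000000007
  let P' := st.1 ++ [PySem.Int.mod (PySem.List.pyGetD st.1 (-1) 0 + dpr) 1000000007]
  (P', st.2.1.insert f r, left)

def supplement_alt (N : Int) (M : Int) (F : List Int) : Int :=
  let st := (PySem.List.pyRange 0 N 1).foldl (supAltStep F) ([0, 1], PySem.Dict.empty, 0)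
  PySem.Int.mod (PySem.List.pyGetD st.1 (-1) 0 - PySem.List.pyGetD st.1 (-2) 0) 1000000007

-- ===== PRECONDITION & SPEC =====
-- Pre_ restricts to the task's natural domain (0 ≤ N ≤ len F, flavors 0..M): outside it A either
-- raises (N < 0, N > len F, a flavor outside [-(M+1), M]) or, for flavors in [-(M+1), -1], A's
-- Python negative-index wraparound accidentally identifies flavor -k with flavor M+1-k.
def Pre_supplement (N : Int) (M : Int) (F : List Int) : Prop :=
  0 ≤ N ∧ N ≤ F.length ∧ ∀ i : Nat, i < N.toNat → 0 ≤ F.getD i 0 ∧ F.getD i 0 ≤ M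
instance (N : Int) (M : Int) (F : List Int) : Decidable (Pre_supplement N M F) := by
  unfold Pre_supplement; infer_instance
def pvWitness_supplement : Int × Int × List Int := (3, 2, [1, 2, 1])

def Spec_supplement (N : Int) (M : Int) (F : List Int) (out : Int) : Prop := out = supplement_alt N M F
instance (N : Int) (M : Int) (F : List Int) (out : Int) : Decidable (Spec_supplement N M F out) := by
  unfold Spec_supplement; infer_instance

-- ===== CLAIM (what is proved, stated in full; the proofs are below) =====
def Claim_equal_supplement : Prop := ∀ (N : Int) (M : Int) (F : List Int), Dom_supplement N M F → Pre_supplement N M F → Spec_supplement N M F (supplement N M F)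

-- ===== LEMMAS AND PROOFS =====

-- last occurrence of v among F[0..r) (as an index), and the derived window left ends
def lastOcc (F : List Int) (v : Int) : Nat → Option Nat
  | 0 => none
  | j + 1 => if F.getD j 0 = v then some j else lastOcc F v j

-- 1 + last occurrence of F[r] before r (0 if none): the forced left end when processing r
def prevN (F : List Int) (r : Nat) : Nat :=
  ((lastOcc F (F.getD r 0) r).map (· + 1)).getD 0

-- the window's left end after k iterations of the loop
def lft (F : List Int) : Nat → Nat
  | 0 => 0
  | k + 1 => max (lft F k) (prevN F k)

-- the dp values dp[0..k] as a list
def dps (F : List Int) : Nat → List Int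
  | 0 => [1]
  | k + 1 => dps F k ++ [PySem.Int.mod (((dps F k).drop (lft F (k + 1))).sum) 1000000007]

theorem lastOcc_lt {F : List Int} {v : Int} : ∀ {r j : Nat}, lastOcc F v r = some j → j < r := by
  intro r
  induction r with
  | zero => intro j h; simp [lastOcc] at h
  | succ r ih =>
    intro j h
    simp only [lastOcc] at h
    split at h
    · cases h; omega
    · exact Nat.lt_succ_of_lt (ih h)

theorem lastOcc_eq {F : List Int} {v : Int} : ∀ {r j : Nat}, lastOcc F v r = some j → F.getD j 0 = v := by
  intro r
  induction r with
  | zero => intro j h; simp [lastOcc] at h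
  | succ r ih =>
    intro j h
    simp only [lastOcc] at h
    split at h
    · cases h; assumption
    · exact ih h

theorem lastOcc_last {F : List Int} {v : Int} : ∀ {r j : Nat}, lastOcc F v r = some j →
    ∀ i, j < i → i < r → F.getD i 0 ≠ v := by
  intro r
  induction r with
  | zero => intro j h; simp [lastOcc] at h
  | succ r ih =>
    intro j h i hji hir
    simp only [lastOcc] at h
    split at h
    · cases h; omega
    · rename_i hne
      rcases Nat.lt_succ_iff_lt_or_eq.mp hir with h' | h'
      · exact ih h i hji h'
      · subst h'; exact hne

theorem lastOcc_none {F : List Int} {v : Int} : ∀ {r : Nat}, lastOcc F v r = none →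
    ∀ i, i < r → F.getD i 0 ≠ v := by
  intro r
  induction r with
  | zero => intro h i hi; omega
  | succ r ih =>
    intro h i hi
    simp only [lastOcc] at h
    split at h
    · cases h
    · rcases Nat.lt_succ_iff_lt_or_eq.mp hi with h' | h'
      · exact ih h i h'
      · subst h'; assumption

theorem lastOcc_ge {F : List Int} {v : Int} : ∀ {r i : Nat}, i < r → F.getD i 0 = v →
    ∃ j, lastOcc F v r = some j ∧ i ≤ j := by
  intro r
  induction r with
  | zero => intro i hi; omega
  | succ r ih =>
    intro i hi he
    simp only [lastOcc]
    split
    · exact ⟨r, rfl, by omega⟩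
    · rename_i hne
      have hir : i < r := by
        rcases Nat.lt_succ_iff_lt_or_eq.mp hi with h' | h'
        · exact h'
        · subst h'; exact absurd he hne
      exact ih hir he

theorem prevN_le (F : List Int) (r : Nat) : prevN F r ≤ r := by
  unfold prevN
  cases h : lastOcc F (F.getD r 0) r with
  | none => simp
  | some j => simp only [Option.map_some, Option.getD_some]; exact lastOcc_lt h

theorem prevN_no (F : List Int) (r : Nat) :
    ∀ i, prevN F r ≤ i → i < r → F.getD i 0 ≠ F.getD r 0 := by
  unfold prevN
  cases h : lastOcc F (F.getD r 0) r with
  | none => intro i _ hir; exact lastOcc_none h i hir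
  | some j =>
    intro i hji hir
    simp only [Option.map_some, Option.getD_some] at hji
    exact lastOcc_last h i (by omega) hir

theorem window_mem_iff (F : List Int) (l r : Nat) :
    (∃ i, l ≤ i ∧ i < r ∧ F.getD i 0 = F.getD r 0) ↔ l < prevN F r := by
  constructor
  · rintro ⟨i, hli, hir, he⟩
    obtain ⟨j, hj, hij⟩ := lastOcc_ge hir he
    have hpj : prevN F r = j + 1 := by unfold prevN; rw [hj]; rfl
    omega
  · intro h
    unfold prevN at h
    cases hlo : lastOcc F (F.getD r 0) r with
    | none => rw [hlo] at h; simp at h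
    | some j =>
      rw [hlo] at h
      simp only [Option.map_some, Option.getD_some] at h
      exact ⟨j, by omega, lastOcc_lt hlo, lastOcc_eq hlo⟩

theorem lft_le (F : List Int) : ∀ k, lft F k ≤ k := by
  intro k
  induction k with
  | zero => simp [lft]
  | succ k ih => simp only [lft]; have := prevN_le F k; omega

theorem lft_mono (F : List Int) (k : Nat) : lft F k ≤ lft F (k + 1) := by
  simp only [lft]; omega

theorem window_distinct (F : List Int) : ∀ k, ∀ i j, lft F k ≤ i → i < j → j < k →
    F.getD i 0 ≠ F.getD j 0 := by
  intro k
  induction k with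
  | zero => intro i j _ _ h; omega
  | succ k ih =>
    intro i j hli hij hjk
    rcases Nat.lt_succ_iff_lt_or_eq.mp hjk with h' | h'
    · exact ih i j (le_trans (lft_mono F k) hli) hij h'
    · subst h'
      refine prevN_no F j i ?_ hij
      simp only [lft] at hli; omega

theorem dps_length (F : List Int) : ∀ k, (dps F k).length = k + 1 := by
  intro k
  induction k with
  | zero => simp [dps]
  | succ k ih => simp [dps, ih]

def dpv (F : List Int) (k : Nat) : Int := (dps F k).getD k 0

theorem dpv_zero (F : List Int) : dpv F 0 = 1 := by simp [dpv, dps]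

theorem dpv_succ (F : List Int) (k : Nat) :
    dpv F (k + 1) = PySem.Int.mod (((dps F k).drop (lft F (k + 1))).sum) 1000000007 := by
  simp [dpv, dps, dps_length]

theorem dps_succ (F : List Int) (k : Nat) : dps F (k + 1) = dps F k ++ [dpv F (k + 1)] := by
  rw [dpv_succ]; rfl

theorem dpv_bounds (F : List Int) (k : Nat) : 0 ≤ dpv F k ∧ dpv F k < 1000000007 := by
  cases k with
  | zero => rw [dpv_zero]; omega
  | succ k =>
    rw [dpv_succ, PySem.Int.mod_eq_emod_of_pos (by norm_num)]
    exact ⟨Int.emod_nonneg _ (by norm_num), Int.emod_lt_of_pos _ (by norm_num)⟩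

theorem dps_getD (F : List Int) : ∀ k j, j ≤ k → (dps F k).getD j 0 = dpv F j := by
  intro k
  induction k with
  | zero => intro j hj; interval_cases j; rw [dpv_zero]; simp [dps]
  | succ k ih =>
    intro j hj
    rcases Nat.lt_succ_iff_lt_or_eq.mp (Nat.lt_succ_of_le hj) with h' | h'
    · rw [dps_succ, List.getD_append _ _ _ _ (by rw [dps_length]; omega)]
      exact ih j (by omega)
    · subst h'; rfl

theorem dps_take (F : List Int) (k j : Nat) (h : j ≤ k + 1) :
    (dps F (k + 1)).take j = (dps F k).take j := by
  rw [dps_succ, List.take_append_of_le_length (by rw [dps_length]; omega)]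

-- getD-form of reading a boolean table at a flavour index
theorem pyGetD_toNat (us : List Bool) (v : Int) (hv : 0 ≤ v) (hlen : v < us.length) :
    PySem.List.pyGetD us v false = us.getD v.toNat false := by
  rw [PySem.List.pyGetD_eq_getElem us false hv hlen, List.getD_eq_getElem us false (by omega)]

theorem getD_set' {α : Type} (xs : List α) (i j : Nat) (v d : α) :
    (xs.set i v).getD j d = if i = j ∧ i < xs.length then v else xs.getD j d := by
  simp only [List.getD_eq_getElem?_getD, List.getElem?_set]
  split_ifs with h1 h2 h3 <;> simp_all <;> omega

theorem supWhile_spec (F dp : List Int) (n : Nat) (M : Int) (k : Nat)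
    (hk : k < n) (hnF : n ≤ F.length)
    (hFk : ∀ i : Nat, i < n → 0 ≤ F.getD i 0 ∧ F.getD i 0 ≤ M)
    (hdp : dp = dps F k ++ List.replicate (n - k) 0) :
    ∀ fuel (l : Nat) us (s : Int),
      l ≤ k → prevN F k ≤ l + fuel →
      us.length = (M + 1).toNat →
      (∀ v : Int, 0 ≤ v → v ≤ M →
        (us.getD v.toNat false = true ↔ ∃ i, l ≤ i ∧ i < k ∧ F.getD i 0 = v)) →
      s = PySem.Int.mod (((dps F k).drop l).sum) 1000000007 →
      (∀ i j : Nat, l ≤ i → i < j → j < k → F.getD i 0 ≠ F.getD j 0) →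
      ∃ us', supWhile F dp (F.getD k 0) fuel us (l : Int) s
        = (us', ((max l (prevN F k) : Nat) : Int),
           PySem.Int.mod (((dps F k).drop (max l (prevN F k))).sum) 1000000007) ∧
        us'.length = (M + 1).toNat ∧
        (∀ v : Int, 0 ≤ v → v ≤ M →
          (us'.getD v.toNat false = true ↔ ∃ i, max l (prevN F k) ≤ i ∧ i < k ∧ F.getD i 0 = v)) := by
  intro fuel
  induction fuel with
  | zero =>
    intro l us s hlk hfuel hlen hind hs hdist
    have hmax : max l (prevN F k) = l := by omega
    exact ⟨us, by rw [supWhile, hmax, ← hs], by rw [hmax]; exact ⟨hlen, hind⟩⟩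
  | succ fuel ih =>
    intro l us s hlk hfuel hlen hind hs hdist
    have hfk : 0 ≤ F.getD k 0 ∧ F.getD k 0 ≤ M := hFk k hk
    have hfklen : F.getD k 0 < us.length := by rw [hlen]; omega
    have hcond : PySem.List.pyGetD us (F.getD k 0) false
        = us.getD (F.getD k 0).toNat false := pyGetD_toNat us _ hfk.1 hfklen
    by_cases hpl : prevN F k ≤ l
    · -- the flavour F[k] is not in the window: the loop exits at once
      have hfalse : us.getD (F.getD k 0).toNat false = false := by
        rw [Bool.eq_false_iff]
        intro htrue
        have : l < prevN F k := (window_mem_iff F l k).mp ((hind _ hfk.1 hfk.2).mp htrue)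
        omega
      have hmax : max l (prevN F k) = l := by omega
      refine ⟨us, ?_, by rw [hmax]; exact ⟨hlen, hind⟩⟩
      rw [supWhile, hcond, hfalse, hmax, ← hs, if_neg Bool.false_ne_true]
    · -- F[k] occurs in the window: one step of the loop, then recurse
      rw [not_le] at hpl
      have hprevk := prevN_le F k
      have hlk' : l < k := by omega
      have hfl : 0 ≤ F.getD l 0 ∧ F.getD l 0 ≤ M := hFk l (by omega)
      have htrue : us.getD (F.getD k 0).toNat false = true :=
        (hind _ hfk.1 hfk.2).mpr ((window_mem_iff F l k).mpr hpl)
      have hFl : PySem.List.pyGetD F (l : Int) 0 = F.getD l 0 := by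
        simp
      have hdpl : PySem.List.pyGetD dp (l : Int) 0 = dpv F l := by
        rw [PySem.List.pyGetD_natCast, hdp,
          List.getD_append _ _ _ _ (by rw [dps_length]; omega)]
        exact dps_getD F k l (by omega)
      have hsplit : ((dps F k).drop l).sum = dpv F l + ((dps F k).drop (l + 1)).sum := by
        have hlen' : l < (dps F k).length := by rw [dps_length]; omega
        rw [List.drop_eq_getElem_cons hlen', List.sum_cons,
          ← List.getD_eq_getElem (dps F k) 0 hlen', dps_getD F k l (by omega)]
      set us' := PySem.List.pySetD us (F.getD l 0) false with hus'def
      have hsetform : us' = us.set (F.getD l 0).toNat false := by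
        rw [hus'def, PySem.List.pySetD_of_nonneg us false hfl.1]
      have hlen2 : us'.length = (M + 1).toNat := by rw [hsetform, List.length_set, hlen]
      have hind2 : ∀ v : Int, 0 ≤ v → v ≤ M →
          (us'.getD v.toNat false = true ↔ ∃ i, l + 1 ≤ i ∧ i < k ∧ F.getD i 0 = v) := by
        intro v hv0 hvM
        rw [hsetform, getD_set']
        by_cases hvf : v = F.getD l 0
        · subst hvf
          rw [if_pos ⟨rfl, by omega⟩]
          simp only [Bool.false_eq_true, false_iff]
          rintro ⟨i, h1, h2, h3⟩
          exact hdist l i (le_refl l) (by omega) h2 h3.symm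
        · have : (F.getD l 0).toNat ≠ v.toNat := by omega
          rw [if_neg (by tauto), hind v hv0 hvM]
          constructor
          · rintro ⟨i, h1, h2, h3⟩
            refine ⟨i, ?_, h2, h3⟩
            rcases Nat.eq_or_lt_of_le h1 with h' | h'
            · exfalso; apply hvf; rw [← h3, ← h']
            · omega
          · rintro ⟨i, h1, h2, h3⟩; exact ⟨i, by omega, h2, h3⟩
      have hdist2 : ∀ i j : Nat, l + 1 ≤ i → i < j → j < k → F.getD i 0 ≠ F.getD j 0 :=
        fun i j h1 h2 h3 => hdist i j (by omega) h2 h3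
      set s' := PySem.Int.mod (s - PySem.List.pyGetD dp (l : Int) 0) 1000000007 with hs'def
      have hs2 : s' = PySem.Int.mod (((dps F k).drop (l + 1)).sum) 1000000007 := by
        rw [hs'def, hdpl, hs, hsplit, PySem.Int.mod_eq_emod_of_pos (by norm_num),
          PySem.Int.mod_eq_emod_of_pos (by norm_num),
          PySem.Int.mod_eq_emod_of_pos (by norm_num)]
        omega
      obtain ⟨us'', heq, hlen3, hind3⟩ :=
        ih (l + 1) us' s' (by omega) (by omega) hlen2 hind2 hs2 hdist2
      have hmax1 : max l (prevN F k) = prevN F k := by omega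
      have hmax2 : max (l + 1) (prevN F k) = prevN F k := by omega
      rw [hmax2] at heq hind3
      refine ⟨us'', ?_, hlen3, by rw [hmax1]; exact hind3⟩
      have hcast : (l : Int) + 1 = ((l + 1 : Nat) : Int) := by push_cast; ring
      rw [supWhile, hcond, htrue, hFl, ← hus'def, ← hs'def, hmax1, hcast, if_pos rfl, heq]

def InvA (F : List Int) (n : Nat) (M : Int) (k : Nat)
    (st : List Int × List Bool × Int × Int) : Prop :=
  st.1 = dps F k ++ List.replicate (n - k) 0 ∧
  st.2.2.1 = ((lft F k : Nat) : Int) ∧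
  st.2.2.2 = PySem.Int.mod (((dps F k).drop (lft F k)).sum) 1000000007 ∧
  st.2.1.length = (M + 1).toNat ∧
  (∀ v : Int, 0 ≤ v → v ≤ M →
    (st.2.1.getD v.toNat false = true ↔ ∃ i, lft F k ≤ i ∧ i < k ∧ F.getD i 0 = v))

theorem supStep_inv (F : List Int) (n : Nat) (M : Int) (k : Nat)
    (hk : k < n) (hnF : n ≤ F.length)
    (hFk : ∀ i : Nat, i < n → 0 ≤ F.getD i 0 ∧ F.getD i 0 ≤ M)
    (st : List Int × List Bool × Int × Int) (h : InvA F n M k st) :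
    InvA F n M (k + 1) (supStep F st (k : Int)) := by
  obtain ⟨dp, us, l, s⟩ := st
  obtain ⟨hdp, hl, hs, hlen, hind⟩ := h
  simp only at hdp hl hs hlen hind
  have hFread : PySem.List.pyGetD F (k : Int) 0 = F.getD k 0 := PySem.List.pyGetD_natCast F k 0
  have hfk := hFk k hk
  obtain ⟨us', heq, hlen', hind'⟩ :=
    supWhile_spec F dp n M k hk hnF hFk hdp F.length (lft F k) us s
      (lft_le F k) (by have := prevN_le F k; omega) hlen hind hs (window_distinct F k)
  have hmax : max (lft F k) (prevN F k) = lft F (k + 1) := rfl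
  rw [hmax] at heq hind'
  have hcast : (k : Int) + 1 = ((k + 1 : Nat) : Int) := by push_cast; ring
  -- the new dp list
  have hlftle : lft F (k + 1) ≤ k + 1 := lft_le F (k + 1)
  have hdpv : PySem.Int.mod (((dps F k).drop (lft F (k + 1))).sum) 1000000007 = dpv F (k + 1) :=
    (dpv_succ F k).symm
  have hdp' : PySem.List.pySetD dp ((k : Int) + 1) (dpv F (k + 1))
      = dps F (k + 1) ++ List.replicate (n - (k + 1)) 0 := by
    rw [hcast, PySem.List.pySetD_natCast, hdp, List.set_append,
      if_neg (by rw [dps_length]; omega)]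
    rw [dps_length, show k + 1 - (k + 1) = 0 from by omega,
      show n - k = (n - (k + 1)) + 1 from by omega, List.replicate_succ, List.set_cons_zero,
      dps_succ]
    simp
  have hget' : PySem.List.pyGetD (dps F (k + 1) ++ List.replicate (n - (k + 1)) 0)
      ((k : Int) + 1) 0 = dpv F (k + 1) := by
    rw [hcast, PySem.List.pyGetD_natCast,
      List.getD_append _ _ _ _ (by rw [dps_length]; omega)]
    exact dps_getD F (k + 1) (k + 1) (le_refl _)
  -- unfold one loop iteration
  simp only [supStep, hFread, hl, heq, hdpv, hdp', hget']
  refine ⟨rfl, rfl, ?_, ?_, ?_⟩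
  · -- the running sum
    simp only
    have hsum : ((dps F (k + 1)).drop (lft F (k + 1))).sum
        = ((dps F k).drop (lft F (k + 1))).sum + dpv F (k + 1) := by
      rw [dps_succ, List.drop_append_of_le_length (by rw [dps_length]; omega), List.sum_append,
        List.sum_singleton]
    rw [hsum, ← hdpv]
    rw [PySem.Int.mod_eq_emod_of_pos (by norm_num), PySem.Int.mod_eq_emod_of_pos (by norm_num),
      PySem.Int.mod_eq_emod_of_pos (by norm_num)]
    omega
  · -- length of the flavour table
    simp only
    rw [PySem.List.pySetD_of_nonneg us' true hfk.1, List.length_set, hlen']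
  · -- the flavour table marks exactly the window [lft (k+1), k+1)
    intro v hv0 hvM
    simp only
    rw [PySem.List.pySetD_of_nonneg us' true hfk.1, getD_set']
    by_cases hvf : v = F.getD k 0
    · subst hvf
      rw [if_pos ⟨rfl, by rw [hlen']; omega⟩]
      simp only [true_iff]
      refine ⟨k, ?_, by omega, rfl⟩
      have h1 : lft F k ≤ k := lft_le F k
      have h2 : prevN F k ≤ k := prevN_le F k
      show max (lft F k) (prevN F k) ≤ k
      omega
    · have hne : (F.getD k 0).toNat ≠ v.toNat := by omega
      rw [if_neg (by tauto), hind' v hv0 hvM]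
      constructor
      · rintro ⟨i, h1, h2, h3⟩; exact ⟨i, h1, by omega, h3⟩
      · rintro ⟨i, h1, h2, h3⟩
        refine ⟨i, h1, ?_, h3⟩
        rcases Nat.lt_succ_iff_lt_or_eq.mp h2 with h' | h'
        · exact h'
        · subst h'; exact absurd h3.symm hvf

theorem invA_init (F : List Int) (n : Nat) (M : Int) :
    InvA F n M 0 (PySem.List.pySetD (List.replicate ((n : Int) + 1).toNat 0) 0 1,
      List.replicate (M + 1).toNat false, 0,
      PySem.List.pyGetD (PySem.List.pySetD (List.replicate ((n : Int) + 1).toNat 0) 0 1) 0 0) := by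
  have htn : ((n : Int) + 1).toNat = n + 1 := by omega
  have hdp0 : PySem.List.pySetD (List.replicate ((n : Int) + 1).toNat 0) 0 1
      = dps F 0 ++ List.replicate (n - 0) 0 := by
    rw [PySem.List.pySetD_of_nonneg _ 1 (by norm_num), htn, List.replicate_succ,
      Int.toNat_zero, List.set_cons_zero]
    rfl
  refine ⟨hdp0, rfl, ?_, ?_, ?_⟩
  · simp only [hdp0]
    rw [PySem.List.pyGetD_zero,
      show ((dps F 0).drop (lft F 0)).sum = 1 from by simp [dps, lft],
      PySem.Int.mod_eq_emod_of_pos (by norm_num)]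
    show (1 : Int) = 1 % 1000000007
    decide
  · simp [List.length_replicate]
  · intro v hv0 hvM
    simp only
    constructor
    · intro h
      exfalso
      have : (List.replicate (M + 1).toNat false).getD v.toNat false = false := by
        simp [List.getD_eq_getElem?_getD, List.getElem?_replicate]
        split <;> simp
      rw [this] at h; exact absurd h (by simp)
    · rintro ⟨i, h1, h2, h3⟩
      simp only [lft] at h1
      omega

theorem foldA (F : List Int) (n : Nat) (M : Int)
    (hnF : n ≤ F.length)
    (hFk : ∀ i : Nat, i < n → 0 ≤ F.getD i 0 ∧ F.getD i 0 ≤ M)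
    (init : List Int × List Bool × Int × Int) (hinit : InvA F n M 0 init) :
    ∀ k, k ≤ n → InvA F n M k ((PySem.List.pyRange 0 (k : Int) 1).foldl (supStep F) init) := by
  intro k
  induction k with
  | zero =>
    intro _
    rw [PySem.List.pyRange_one_eq_nil (by norm_num)]
    exact hinit
  | succ k ih =>
    intro hk
    have hcast : ((k + 1 : Nat) : Int) = (k : Int) + 1 := by push_cast; ring
    rw [hcast, PySem.List.pyRange_one_succ_right (by positivity), List.foldl_append]
    simp only [List.foldl_cons, List.foldl_nil]
    exact supStep_inv F n M k (by omega) hnF hFk _ (ih (by omega))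

def InvB (F : List Int) (k : Nat) (st : List Int × PySem.Dict Int Int × Int) : Prop :=
  st.1.length = k + 2 ∧
  (∀ j : Nat, j ≤ k + 1 → st.1.getD j 0 = PySem.Int.mod (((dps F k).take j).sum) 1000000007) ∧
  (∀ v : Int, st.2.1.get? v = (lastOcc F v k).map (fun j => (j : Int))) ∧
  st.2.2 = ((lft F k : Nat) : Int)

theorem supAltStep_inv (F : List Int) (k : Nat) (st : List Int × PySem.Dict Int Int × Int)
    (h : InvB F k st) : InvB F (k + 1) (supAltStep F st (k : Int)) := by
  obtain ⟨P, last, left⟩ := st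
  obtain ⟨hPlen, hPval, hlast, hleft⟩ := h
  simp only at hPlen hPval hlast hleft
  have hFread : PySem.List.pyGetD F (k : Int) 0 = F.getD k 0 := PySem.List.pyGetD_natCast F k 0
  have hlft1 : lft F (k + 1) = max (lft F k) (prevN F k) := rfl
  have hleft' :
      (if (last.contains (F.getD k 0) && decide (last.getD (F.getD k 0) 0 + 1 > left)) = true then
        last.getD (F.getD k 0) 0 + 1 else left) = ((lft F (k + 1) : Nat) : Int) := by
    cases hlo : lastOcc F (F.getD k 0) k with
    | none =>
      have hc : last.contains (F.getD k 0) = false := by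
        rw [PySem.Dict.contains_eq_isSome_get?, hlast, hlo]; rfl
      have hp : prevN F k = 0 := by unfold prevN; rw [hlo]; rfl
      rw [hc, Bool.false_and, if_neg (by simp), hleft, hlft1, hp]
      norm_num
    | some j =>
      have hc : last.contains (F.getD k 0) = true := by
        rw [PySem.Dict.contains_eq_isSome_get?, hlast, hlo]; rfl
      have hg : last.getD (F.getD k 0) 0 = (j : Int) := by
        rw [PySem.Dict.getD_eq_get?_getD, hlast, hlo]; rfl
      have hp : prevN F k = j + 1 := by unfold prevN; rw [hlo]; rfl
      rw [hc, hg, hleft, hlft1, hp, Bool.true_and]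
      split
      · rename_i hcc
        have := of_decide_eq_true hcc
        push_cast
        omega
      · rename_i hcc
        have := of_decide_eq_false (Bool.eq_false_iff.mpr hcc)
        push_cast
        omega
  have hidx : P.length - 1 = k + 1 := by omega
  have hne' : P ≠ [] := List.ne_nil_of_length_pos (by omega)
  have hPm1 : PySem.List.pyGetD P (-1) 0 = P.getD (k + 1) 0 := by
    rw [PySem.List.pyGetD_neg_one P 0 hne', List.getLast_eq_getElem]
    simp only [hidx]
    exact (List.getD_eq_getElem P 0 (by omega)).symm
  have hPl : PySem.List.pyGetD P ((lft F (k + 1) : Nat) : Int) 0 = P.getD (lft F (k + 1)) 0 :=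
    PySem.List.pyGetD_natCast P (lft F (k + 1)) 0
  have hPfull : (dps F k).take (k + 1) = dps F k := by
    rw [← dps_length F k]; exact List.take_length
  have hsplit : (dps F k).sum
      = ((dps F k).take (lft F (k + 1))).sum + ((dps F k).drop (lft F (k + 1))).sum := by
    rw [← List.sum_append, List.take_append_drop]
  have hdpr : PySem.Int.mod (P.getD (k + 1) 0 - P.getD (lft F (k + 1)) 0) 1000000007
      = dpv F (k + 1) := by
    rw [hPval (k + 1) (le_refl _), hPval (lft F (k + 1)) (lft_le F (k + 1)), hPfull, dpv_succ,
      PySem.Int.mod_eq_emod_of_pos (by norm_num), PySem.Int.mod_eq_emod_of_pos (by norm_num),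
      PySem.Int.mod_eq_emod_of_pos (by norm_num), PySem.Int.mod_eq_emod_of_pos (by norm_num)]
    omega
  simp only [supAltStep, hFread, hleft', hPm1, hPl, hdpr]
  refine ⟨by simp [hPlen], ?_, ?_, rfl⟩
  · intro j hj
    rcases Nat.lt_or_ge j (k + 2) with hj' | hj'
    · rw [List.getD_append _ _ _ _ (by omega), hPval j (by omega), dps_take F k j (by omega)]
    · have hj2 : j = k + 2 := by omega
      subst hj2
      rw [List.getD_append_right P _ 0 (k + 2) (by omega)]
      simp only [hPlen, Nat.sub_self, List.getD_cons_zero]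
      rw [hPval (k + 1) (le_refl _), hPfull]
      have htake : (dps F (k + 1)).take (k + 2) = dps F (k + 1) := by
        rw [← dps_length F (k + 1)]; exact List.take_length
      rw [htake, dps_succ, List.sum_append, List.sum_singleton,
        PySem.Int.mod_eq_emod_of_pos (by norm_num), PySem.Int.mod_eq_emod_of_pos (by norm_num),
        PySem.Int.mod_eq_emod_of_pos (by norm_num)]
      omega
  · intro v
    rw [PySem.Dict.get?_insert]
    by_cases hv : v = F.getD k 0
    · subst hv
      have hsome : lastOcc F (F.getD k 0) (k + 1) = some k := by
        simp [lastOcc]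
      rw [if_pos rfl, hsome]
      rfl
    · rw [if_neg hv]
      have hfv : ¬ (F.getD k 0 = v) := fun h => hv h.symm
      have : lastOcc F v (k + 1) = lastOcc F v k := by
        show (if F.getD k 0 = v then some k else lastOcc F v k) = lastOcc F v k
        rw [if_neg hfv]
      rw [this]
      exact hlast v

theorem invB_init (F : List Int) :
    InvB F 0 ([0, 1], PySem.Dict.empty, 0) := by
  refine ⟨rfl, ?_, ?_, rfl⟩
  · intro j hj
    interval_cases j
    · rw [show (List.take 0 (dps F 0)).sum = (0 : Int) from rfl]
      decide
    · rw [show (List.take 1 (dps F 0)).sum = (1 : Int) from rfl]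
      decide
  · intro v
    rw [PySem.Dict.get?_empty]
    rfl

theorem foldB (F : List Int) :
    ∀ k, InvB F k ((PySem.List.pyRange 0 (k : Int) 1).foldl (supAltStep F) ([0, 1], PySem.Dict.empty, 0)) := by
  intro k
  induction k with
  | zero =>
    rw [PySem.List.pyRange_one_eq_nil (by norm_num)]
    exact invB_init F
  | succ k ih =>
    have hcast : ((k + 1 : Nat) : Int) = (k : Int) + 1 := by push_cast; ring
    rw [hcast, PySem.List.pyRange_one_succ_right (by positivity), List.foldl_append]
    simp only [List.foldl_cons, List.foldl_nil]
    exact supAltStep_inv F k _ ih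

theorem dps_drop_last (F : List Int) (k : Nat) : (dps F k).drop k = [dpv F k] := by
  have hlen : k < (dps F k).length := by rw [dps_length]; omega
  rw [List.drop_eq_getElem_cons hlen, ← List.getD_eq_getElem (dps F k) 0 hlen,
    dps_getD F k k (le_refl _)]
  congr 1
  exact List.drop_eq_nil_of_le (by rw [dps_length])

-- ===== VERDICT (by name: the statement is the Claim_ definition above) =====
theorem supplement_spec : Claim_equal_supplement := by
  unfold Claim_equal_supplement Spec_supplement
  intro N M F hDom hPre
  obtain ⟨hN0, hNlen, hF⟩ := hPre
  set n := N.toNat with hn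
  have hNeq : N = (n : Int) := by omega
  have hnF : n ≤ F.length := by omega
  have hFk : ∀ i : Nat, i < n → 0 ≤ F.getD i 0 ∧ F.getD i 0 ≤ M := fun i hi => hF i (by omega)
  rw [hNeq]
  simp only [supplement, supplement_alt]
  -- A side: the invariant after n iterations
  obtain ⟨hdp, hl, hs, hlen, hind⟩ :=
    foldA F n M hnF hFk _ (invA_init F n M) n (le_refl n)
  rw [hdp, Nat.sub_self, List.replicate_zero, List.append_nil, PySem.List.pyGetD_natCast,
    dps_getD F n n (le_refl n)]
  -- B side: the invariant after n iterations
  obtain ⟨hPlen, hPval, hlast, hleft⟩ := foldB F n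
  set P := ((PySem.List.pyRange 0 ((n : Nat) : Int) 1).foldl (supAltStep F)
    ([0, 1], PySem.Dict.empty, 0)).1 with hP
  have hne' : P ≠ [] := List.ne_nil_of_length_pos (by omega)
  have hidx1 : P.length - 1 = n + 1 := by omega
  have hidx2 : P.length - 2 = n := by omega
  have hPm1 : PySem.List.pyGetD P (-1) 0 = P.getD (n + 1) 0 := by
    rw [PySem.List.pyGetD_neg_one P 0 hne', List.getLast_eq_getElem]
    simp only [hidx1]
    exact (List.getD_eq_getElem P 0 (by omega)).symm
  have hPm2 : PySem.List.pyGetD P (-2) 0 = P.getD n 0 := by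
    rw [PySem.List.pyGetD_neg_ofNat P 2 0 (by norm_num) (by omega)]
    simp only [hidx2]
    exact (List.getD_eq_getElem P 0 (by omega)).symm
  have hfull : (dps F n).take (n + 1) = dps F n := by
    rw [← dps_length F n]; exact List.take_length
  have hsplit : (dps F n).sum = ((dps F n).take n).sum + dpv F n := by
    conv_lhs => rw [← List.take_append_drop n (dps F n)]
    rw [List.sum_append, dps_drop_last, List.sum_singleton]
  have hbounds := dpv_bounds F n
  rw [hPm1, hPm2, hPval (n + 1) (le_refl _), hPval n (by omega), hfull,
    PySem.Int.mod_eq_emod_of_pos (by norm_num), PySem.Int.mod_eq_emod_of_pos (by norm_num),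
    PySem.Int.mod_eq_emod_of_pos (by norm_num)]
  omega
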